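-- pv_equiv track=rewrite | github.com/OlegPustovalov/Files | file_1.py | func_ingred
-- ===== SOURCE A (Python) =====
-- def func_ingred (str_ingred):
--     dict_={}
--     str1 = ''
--     m = 0
--     for sumbol in str_ingred:
--         if sumbol == '|' and m == 0:
--             dict_['ingredient_named'] = str1
--             m = 1
--             str1 = ''
--         elif sumbol == '|' and m == 1:
--             str2 = str1.replace(' ','')
--             str3 = str2.replace('|','')
--             dict_['quantity'] = str3
--             m = 2
--             str1 = ''
--         str1 = str1 + sumbol
--         if m == 2:
--             str2 = str1.replace('\n','')
--             str3 = str2.replace('| ','')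
--             dict_['measure'] =str3
--     return dict_
-- ===== SOURCE B (Python) =====
-- def func_ingred(str_ingred):
--     first = str_ingred.find('|')
--     if first == -1:
--         return {}
--     d = {'ingredient_named': str_ingred[:first]}
--     second = str_ingred.find('|', first + 1)
--     if second == -1:
--         return d
--     d['quantity'] = str_ingred[first + 1:second].replace(' ', '')
--     d['measure'] = str_ingred[second:].replace('\n', '').replace('| ', '')
--     return d
-- ===== Notes on version B (the rewrite author's own statement) =====
-- stated objective: faster
-- what changed: Replaces A's per-character three-state scan (which rebuilds and re-cleans the measure string at every character) by locating the first two pipe separators with str.find and slicing the three fields out directly.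
import Mathlib
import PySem

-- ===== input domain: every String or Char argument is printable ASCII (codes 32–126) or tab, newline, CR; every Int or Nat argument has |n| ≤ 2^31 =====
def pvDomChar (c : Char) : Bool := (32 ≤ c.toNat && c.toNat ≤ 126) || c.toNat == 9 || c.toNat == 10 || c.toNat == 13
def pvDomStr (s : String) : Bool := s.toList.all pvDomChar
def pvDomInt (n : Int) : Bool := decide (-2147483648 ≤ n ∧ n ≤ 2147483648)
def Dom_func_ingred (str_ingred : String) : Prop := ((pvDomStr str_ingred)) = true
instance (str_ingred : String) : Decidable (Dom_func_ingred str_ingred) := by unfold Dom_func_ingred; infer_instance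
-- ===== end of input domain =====

-- B locates the first two '|' separators with find and slices the three fields out directly,
-- instead of A's per-character three-state scan (objective: faster; same return value everywhere).

-- ===== PORT A =====
-- loop body of A's 'for sumbol in str_ingred' (state: dict_, str1, m)
def stepA (st : PySem.Dict String String × List Char × Nat) (c : Char) :
    PySem.Dict String String × List Char × Nat :=
  let d := st.1
  let str1 := st.2.1
  let m := st.2.2
  let t1 : PySem.Dict String String × List Char × Nat :=
    if c = '|' ∧ m = 0 then
      (d.insert "ingredient_named" (String.ofList str1), [], 1)
    else if c = '|' ∧ m = 1 then
      (d.insert "quantity"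
        (String.ofList (PySem.Chars.replace (PySem.Chars.replace str1 [' '] []) ['|'] [])), [], 2)
    else (d, str1, m)
  let str1' := t1.2.1 ++ [c]
  let d' :=
    if t1.2.2 = 2 then
      t1.1.insert "measure"
        (String.ofList (PySem.Chars.replace (PySem.Chars.replace str1' ['\n'] []) ['|', ' '] []))
    else t1.1
  (d', str1', t1.2.2)

def func_ingred (str_ingred : String) : List (String × String) :=
  (str_ingred.toList.foldl stepA (⟨[]⟩, [], 0)).1.items

-- ===== PORT B =====
def func_ingred_alt (str_ingred : String) : List (String × String) :=
  let cs := str_ingred.toList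
  let first := PySem.Chars.find cs ['|']
  if first = -1 then (⟨[]⟩ : PySem.Dict String String).items
  else
    let d := (PySem.Dict.insert ⟨[]⟩ "ingredient_named"
      (String.ofList (PySem.Chars.slice cs none (some first))))
    let second := PySem.Chars.findFrom cs ['|'] (first + 1) none
    if second = -1 then d.items
    else
      ((d.insert "quantity"
          (String.ofList (PySem.Chars.replace
            (PySem.Chars.slice cs (some (first + 1)) (some second)) [' '] []))).insert
        "measure"
        (String.ofList (PySem.Chars.replace
          (PySem.Chars.replace (PySem.Chars.slice cs (some second) none) ['\n'] [])
          ['|', ' '] []))).items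

-- ===== PRECONDITION & SPEC =====
def Spec_func_ingred (str_ingred : String) (out : List (String × String)) : Prop := out = func_ingred_alt str_ingred
instance (str_ingred : String) (out : List (String × String)) : Decidable (Spec_func_ingred str_ingred out) := by unfold Spec_func_ingred; infer_instance

-- ===== CLAIM (what is proved, stated in full; the proofs are below) =====
def Claim_equal_func_ingred : Prop := ∀ (str_ingred : String), Dom_func_ingred str_ingred → Spec_func_ingred str_ingred (func_ingred str_ingred)

-- ===== LEMMAS AND PROOFS =====

theorem ins_ins {κ ν : Type} [BEq κ] [LawfulBEq κ] (d : PySem.Dict κ ν) (k : κ) (v v' : ν) :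
    (d.insert k v).insert k v' = d.insert k v' := by
  unfold PySem.Dict.insert PySem.Dict.contains
  by_cases h : (d.items.any fun p => p.1 == k) = true
  · have h2 : ((List.map (fun p => if (p.1 == k) = true then (k, v) else p) d.items).any
        fun p => p.1 == k) = true := by
      simp only [List.any_eq_true] at h ⊢
      obtain ⟨p, hp, hk⟩ := h
      exact ⟨(k, v), List.mem_map.mpr ⟨p, hp, by simp [hk]⟩, by simp⟩
    simp only [h, if_true, h2]
    congr 1
    rw [List.map_map]
    apply List.map_congr_left
    intro p _
    by_cases hk : (p.1 == k) = true <;> simp [Function.comp, hk]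
  · have h2 : ((d.items ++ [(k, v)]).any fun p => p.1 == k) = true := by
      simp
    simp only [Bool.not_eq_true] at h
    simp only [h, Bool.false_eq_true, if_false, h2, if_true]
    congr 1
    rw [List.map_append]
    have he : List.map (fun p => if (p.1 == k) = true then (k, v') else p) d.items = d.items := by
      conv_rhs => rw [← List.map_id d.items]
      apply List.map_congr_left
      intro p hp
      have hb : (p.1 == k) = false := by
        by_contra hc
        simp only [Bool.not_eq_false] at hc
        have hh : (d.items.any fun q => q.1 == k) = true := List.any_eq_true.mpr ⟨p, hp, hc⟩
        simp [hh] at h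
      simp [hb]
    simp [he]

theorem replace_go_single (o : Char) :
    ∀ (fuel : Nat) (s acc : List Char), s.length ≤ fuel →
      PySem.Chars.replace.go [o] [] fuel s acc = acc.reverse ++ s.filter (fun c => !(c == o)) := by
  intro fuel
  induction fuel with
  | zero =>
    intro s acc h
    have : s = [] := List.eq_nil_of_length_eq_zero (Nat.le_zero.mp h)
    subst this
    simp [PySem.Chars.replace.go]
  | succ n ih =>
    intro s acc h
    cases s with
    | nil => simp [PySem.Chars.replace.go]
    | cons c t =>
      simp only [PySem.Chars.replace.go]
      by_cases hc : c = o
      · subst hc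
        have hpre : List.isPrefixOf [c] (c :: t) = true := by simp [List.isPrefixOf]
        simp only [hpre, if_true]
        rw [ih _ _ (by simpa using Nat.le_of_succ_le_succ h)]
        simp
      · have hpre : List.isPrefixOf [o] (c :: t) = false := by
          simp [List.isPrefixOf]
          exact fun he => absurd he.symm hc
        simp only [hpre, Bool.false_eq_true, if_false]
        rw [ih _ _ (by simpa using Nat.le_of_succ_le_succ h)]
        simp [hc]

theorem replace_single_empty (o : Char) (s : List Char) :
    PySem.Chars.replace s [o] [] = s.filter (fun c => !(c == o)) := by
  unfold PySem.Chars.replace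
  simp only [List.isEmpty, Bool.false_eq_true, if_false]
  simpa using replace_go_single o s.length s [] le_rfl

theorem pnop (cs : List Char) (h : ∀ c ∈ cs, c ≠ '|') :
    ∀ (d : PySem.Dict String String) (acc : List Char) (m : Nat), m ≠ 2 →
      cs.foldl stepA (d, acc, m) = (d, acc ++ cs, m) := by
  induction cs with
  | nil => intro d acc m hm; simp
  | cons c t ih =>
    intro d acc m hm
    have hc : c ≠ '|' := h c (List.mem_cons_self)
    have hstep : stepA (d, acc, m) c = (d, acc ++ [c], m) := by
      simp [stepA, hc, hm]
    rw [List.foldl_cons, hstep, ih (fun x hx => h x (List.mem_cons_of_mem _ hx)) d (acc ++ [c]) m hm]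
    simp

def measf (l : List Char) : String :=
  String.ofList (PySem.Chars.replace (PySem.Chars.replace l ['\n'] []) ['|', ' '] [])

theorem p2 (cs : List Char) :
    ∀ (d : PySem.Dict String String) (acc : List Char),
      cs.foldl stepA (d.insert "measure" (measf acc), acc, 2)
        = (d.insert "measure" (measf (acc ++ cs)), acc ++ cs, 2) := by
  induction cs with
  | nil => intro d acc; simp
  | cons c t ih =>
    intro d acc
    have hstep : stepA (d.insert "measure" (measf acc), acc, 2) c
        = (d.insert "measure" (measf (acc ++ [c])), acc ++ [c], 2) := by
      simp [stepA, measf, ins_ins]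
    rw [List.foldl_cons, hstep, ih d (acc ++ [c])]
    simp

theorem exists_pipe_split (cs : List Char) (h : ¬ ∀ c ∈ cs, c ≠ '|') :
    ∃ pre rest, cs = pre ++ '|' :: rest ∧ ∀ c ∈ pre, c ≠ '|' := by
  induction cs with
  | nil => simp at h
  | cons c t ih =>
    by_cases hc : c = '|'
    · exact ⟨[], t, by simp [hc], by simp⟩
    · have ht : ¬ ∀ x ∈ t, x ≠ '|' := by
        intro hall
        exact h (by intro x hx; rcases List.mem_cons.mp hx with h1 | h2
                    · exact h1 ▸ hc
                    · exact hall x h2)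
      obtain ⟨pre, rest, he, hp⟩ := ih ht
      exact ⟨c :: pre, rest, by simp [he], by
        intro x hx
        rcases List.mem_cons.mp hx with h1 | h2
        · exact h1 ▸ hc
        · exact hp x h2⟩

-- find of a single character at the first occurrence
theorem find_split (p0 r0 : List Char) (h : ∀ c ∈ p0, c ≠ '|') :
    PySem.Chars.find (p0 ++ '|' :: r0) ['|'] = (p0.length : Int) := by
  set cs := p0 ++ '|' :: r0 with hcs
  have hin : ['|'] <:+: cs := ⟨p0, r0, by simp [hcs]⟩
  have hnn : 0 ≤ PySem.Chars.find cs ['|'] := (PySem.Chars.find_nonneg_iff _ _).mpr hin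
  obtain ⟨hpre, hmin⟩ := PySem.Chars.find_spec (s := cs) (sub := ['|']) hnn
  set n := (PySem.Chars.find cs ['|']).toNat with hn
  have hle : n ≤ p0.length := by
    by_contra hlt
    push_neg at hlt
    have : ¬ ['|'] <+: cs.drop p0.length := hmin p0.length hlt
    exact this (by simp [hcs])
  have heq : n = p0.length := by
    rcases Nat.lt_or_ge n p0.length with hl | hg
    · exfalso
      obtain ⟨t, ht⟩ := hpre
      have hget : cs[n]? = some '|' := by
        have := congrArg (fun l => l[0]?) ht
        simpa [List.getElem?_drop] using this.symm
      have hget2 : cs[n]? = p0[n]? := by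
        rw [hcs, List.getElem?_append_left hl]
      rw [hget2] at hget
      rw [List.getElem?_eq_getElem hl] at hget
      have hv : p0[n] = '|' := Option.some.inj hget
      exact h '|' (hv ▸ List.getElem_mem hl) rfl
    · omega
  omega

theorem find_no_pipe (cs : List Char) (h : ∀ c ∈ cs, c ≠ '|') :
    PySem.Chars.find cs ['|'] = -1 := by
  rw [PySem.Chars.find_eq_neg_one_iff]
  rintro ⟨s, t, he⟩
  exact h '|' (by rw [← he]; simp) rfl

-- ===== VERDICT (by name: the statement is the Claim_ definition above) =====
theorem func_ingred_spec : Claim_equal_func_ingred := by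
  intro s _
  unfold Spec_func_ingred
  show func_ingred s = func_ingred_alt s
  simp only [func_ingred, func_ingred_alt]
  generalize s.toList = cs
  by_cases hnp : ∀ c ∈ cs, c ≠ '|'
  · rw [pnop cs hnp ⟨[]⟩ [] 0 (by decide), find_no_pipe cs hnp]
    simp
  · obtain ⟨p0, r0, rfl, hp0⟩ := exists_pipe_split cs hnp
    rw [List.foldl_append, pnop p0 hp0 ⟨[]⟩ [] 0 (by decide), List.foldl_cons]
    have hstep1 : stepA (⟨[]⟩, ([] : List Char) ++ p0, 0) '|'
        = (PySem.Dict.insert ⟨[]⟩ "ingredient_named" (String.ofList p0), ['|'], 1) := by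
      simp [stepA]
    rw [hstep1, find_split p0 r0 hp0]
    have hne : ((p0.length : Int) = -1) = False := eq_false (by omega)
    simp only [hne, if_false]
    have hslice0 : PySem.Chars.slice (p0 ++ '|' :: r0) none (some (p0.length : Int))
        = p0 := by
      rw [PySem.Chars.slice_eq_listSlice, PySem.List.slice_to_natCast]
      simp
    have hk1 : p0.length + 1 ≤ (p0 ++ '|' :: r0).length := by simp
    have hff : PySem.Chars.findFrom (p0 ++ '|' :: r0) ['|'] ((p0.length : Int) + 1) none
        = (if PySem.Chars.find (((p0 ++ '|' :: r0) : List Char).drop (p0.length + 1)) ['|'] = -1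
           then -1
           else ((p0.length + 1 : Nat) : Int)
                + PySem.Chars.find (((p0 ++ '|' :: r0) : List Char).drop (p0.length + 1)) ['|']) := by
      have := PySem.Chars.findFrom_natCast (p0 ++ '|' :: r0) ['|'] (p0.length + 1) hk1
      push_cast at this ⊢
      exact this
    have hdrop : ((p0 ++ '|' :: r0) : List Char).drop (p0.length + 1) = r0 := by
      rw [show p0 ++ '|' :: r0 = (p0 ++ ['|']) ++ r0 by simp,
        show p0.length + 1 = (p0 ++ ['|']).length by simp, List.drop_left]
    rw [hslice0, hff, hdrop]
    by_cases hnp2 : ∀ c ∈ r0, c ≠ '|'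
    · rw [pnop r0 hnp2 _ _ 1 (by decide), find_no_pipe r0 hnp2]
      simp
    · obtain ⟨mid, rest, rfl, hmid⟩ := exists_pipe_split r0 hnp2
      rw [List.foldl_append, pnop mid hmid _ _ 1 (by decide), List.foldl_cons]
      set d1 := PySem.Dict.insert ⟨[]⟩ "ingredient_named" (String.ofList p0) with hd1
      set q := String.ofList (PySem.Chars.replace
        (PySem.Chars.replace (['|'] ++ mid) [' '] []) ['|'] []) with hq
      have hstep2 : stepA (d1, ['|'] ++ mid, 1) '|'
          = ((d1.insert "quantity" q).insert "measure" (measf ['|']), ['|'], 2) := by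
        simp [stepA, measf, hq]
      rw [hstep2, p2 rest _ ['|'], find_split mid rest hmid]
      simp only [show (((mid.length : Int)) = -1) = False from eq_false (by omega), if_false]
      have hcast : (((p0.length + 1 : Nat) : Int) + (mid.length : Int))
          = ((p0.length + 1 + mid.length : Nat) : Int) := by push_cast; ring
      rw [hcast]
      simp only [show ((((p0.length + 1 + mid.length : Nat) : Int)) = -1) = False
        from eq_false (by push_cast; omega), if_false]
      have hsliceq : PySem.Chars.slice (p0 ++ '|' :: (mid ++ '|' :: rest))
          (some ((p0.length : Int) + 1)) (some ((p0.length + 1 + mid.length : Nat) : Int))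
          = mid := by
        rw [PySem.Chars.slice_eq_listSlice]
        have h1 : ((p0.length : Int) + 1) = ((p0.length + 1 : Nat) : Int) := by push_cast; ring
        rw [h1, PySem.List.slice_natCast]
        have hd : ((p0 ++ '|' :: (mid ++ '|' :: rest)) : List Char).drop (p0.length + 1)
            = mid ++ '|' :: rest := by
          rw [show p0 ++ '|' :: (mid ++ '|' :: rest) = (p0 ++ ['|']) ++ (mid ++ '|' :: rest) by simp,
            show p0.length + 1 = (p0 ++ ['|']).length by simp, List.drop_left]
        rw [hd]
        have : p0.length + 1 + mid.length - (p0.length + 1) = mid.length := by omega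
        rw [this, List.take_left']
        rfl
      have hslicem : PySem.Chars.slice (p0 ++ '|' :: (mid ++ '|' :: rest))
          (some ((p0.length + 1 + mid.length : Nat) : Int)) none
          = '|' :: rest := by
        rw [PySem.Chars.slice_eq_listSlice, PySem.List.slice_from_natCast]
        rw [show p0 ++ '|' :: (mid ++ '|' :: rest) = (p0 ++ '|' :: mid) ++ '|' :: rest by simp]
        have : p0.length + 1 + mid.length = (p0 ++ '|' :: mid).length := by simp; omega
        rw [this, List.drop_left]
      rw [hsliceq, hslicem]
      have hqe : q = String.ofList (PySem.Chars.replace mid [' '] []) := by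
        rw [hq, replace_single_empty, replace_single_empty, replace_single_empty]
        congr 1
        rw [List.cons_append, List.nil_append, List.filter_cons_of_pos (by decide),
          List.filter_cons_of_neg (by decide), List.filter_filter]
        apply List.filter_congr
        intro c hc
        simp [hmid c hc]
      rw [hqe]
      rfl
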